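-- pv_equiv track=rewrite | github.com/MrLazyVista/Special-Cube-Calculator | Cubing_Sim.py | is_valid_roll
-- ===== SOURCE A (Python) =====
-- def is_valid_roll(roll):
--     two_appeareances_max = [
--         'ied', 'drop', 'ignore', 'invchance',
--     ]
--     one_appearance_max = ['skill', 'invtime']
--
--     for key in two_appeareances_max:
--         if sum(line.startswith(key) for line in roll) > 2:
--             return False
--
--     for key in one_appearance_max:
--         if sum(line.startswith(key) for line in roll) > 1:
--             return False
--
--     return True
-- ===== SOURCE B (Python) =====
-- def is_valid_roll(roll):
--     ied = drop = ignore = invchance = skill = invtime = 0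
--     for line in roll:
--         if line.startswith('ied'):
--             ied += 1
--         if line.startswith('drop'):
--             drop += 1
--         if line.startswith('ignore'):
--             ignore += 1
--         if line.startswith('invchance'):
--             invchance += 1
--         if line.startswith('skill'):
--             skill += 1
--         if line.startswith('invtime'):
--             invtime += 1
--     return (ied <= 2 and drop <= 2 and ignore <= 2 and invchance <= 2
--             and skill <= 1 and invtime <= 1)
-- ===== Notes on version B (the rewrite author's own statement) =====
-- stated objective: alternative
-- what changed: Replaces A's six separate scans of roll (one sum(...) per key, with early returns) by a single pass over roll that maintains six counters and checks all limits once at the end.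
import Mathlib
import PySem

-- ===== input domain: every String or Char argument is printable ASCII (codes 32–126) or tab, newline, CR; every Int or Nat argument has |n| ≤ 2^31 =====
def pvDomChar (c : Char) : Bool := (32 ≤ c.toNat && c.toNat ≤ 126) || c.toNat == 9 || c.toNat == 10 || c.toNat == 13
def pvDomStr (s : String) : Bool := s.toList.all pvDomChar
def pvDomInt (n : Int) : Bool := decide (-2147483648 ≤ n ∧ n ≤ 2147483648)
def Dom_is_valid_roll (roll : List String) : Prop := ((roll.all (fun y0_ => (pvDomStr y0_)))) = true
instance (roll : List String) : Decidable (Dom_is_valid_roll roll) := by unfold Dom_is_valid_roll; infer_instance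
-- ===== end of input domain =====

-- B fuses A's six separate scans of `roll` into one pass maintaining six counters (alternative structure, same result).


-- ===== PORT A =====
-- sum(line.startswith(key) for line in roll)
def pvSumStarts (roll : List String) (key : String) : Int :=
  roll.foldl (fun acc line => acc + (if PySem.Str.startswith line key then 1 else 0)) 0

def is_valid_roll (roll : List String) : Bool :=
  -- for key in two_appeareances_max: if sum(...) > 2: return False
  if pvSumStarts roll "ied" > 2 then false
  else if pvSumStarts roll "drop" > 2 then false
  else if pvSumStarts roll "ignore" > 2 then false
  else if pvSumStarts roll "invchance" > 2 then false
  -- for key in one_appearance_max: if sum(...) > 1: return False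
  else if pvSumStarts roll "skill" > 1 then false
  else if pvSumStarts roll "invtime" > 1 then false
  else true

-- ===== PORT B =====
def is_valid_roll_alt (roll : List String) : Bool :=
  let c := roll.foldl
    (fun (c : Int × Int × Int × Int × Int × Int) line =>
      let c1 := if PySem.Str.startswith line "ied" then c.1 + 1 else c.1
      let c2 := if PySem.Str.startswith line "drop" then c.2.1 + 1 else c.2.1
      let c3 := if PySem.Str.startswith line "ignore" then c.2.2.1 + 1 else c.2.2.1
      let c4 := if PySem.Str.startswith line "invchance" then c.2.2.2.1 + 1 else c.2.2.2.1
      let c5 := if PySem.Str.startswith line "skill" then c.2.2.2.2.1 + 1 else c.2.2.2.2.1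
      let c6 := if PySem.Str.startswith line "invtime" then c.2.2.2.2.2 + 1 else c.2.2.2.2.2
      (c1, c2, c3, c4, c5, c6))
    (0, 0, 0, 0, 0, 0)
  decide (c.1 ≤ 2) && decide (c.2.1 ≤ 2) && decide (c.2.2.1 ≤ 2) &&
  decide (c.2.2.2.1 ≤ 2) && decide (c.2.2.2.2.1 ≤ 1) && decide (c.2.2.2.2.2 ≤ 1)

-- ===== PRECONDITION & SPEC =====
def Spec_is_valid_roll (roll : List String) (out : Bool) : Prop := out = is_valid_roll_alt roll
instance (roll : List String) (out : Bool) : Decidable (Spec_is_valid_roll roll out) := by unfold Spec_is_valid_roll; infer_instance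

-- ===== CLAIM (what is proved, stated in full; the proofs are below) =====
def Claim_equal_is_valid_roll : Prop := ∀ (roll : List String), Dom_is_valid_roll roll → Spec_is_valid_roll roll (is_valid_roll roll)

-- ===== LEMMAS AND PROOFS =====

-- A-side: each sum is a countP
theorem sum_indicator_eq (p : String → Bool) (t : List String) :
    (t.map (fun l => if p l then (1 : Int) else 0)).sum = (t.countP p : Int) := by
  induction t with
  | nil => simp
  | cons h t ih =>
      by_cases hb : p h = true <;> simp [hb, ih]
      omega

theorem pvSumStarts_eq (roll : List String) (key : String) :
    pvSumStarts roll key = (roll.countP (fun line => PySem.Str.startswith line key) : Int) := by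
  unfold pvSumStarts
  rw [PySem.List.foldl_add (g := fun line => if PySem.Str.startswith line key then (1 : Int) else 0)]
  rw [sum_indicator_eq]
  omega

-- B-side: the fused fold computes the six counts
theorem alt_fold_eq (roll : List String) (c : Int × Int × Int × Int × Int × Int) :
    roll.foldl
      (fun (c : Int × Int × Int × Int × Int × Int) line =>
        let c1 := if PySem.Str.startswith line "ied" then c.1 + 1 else c.1
        let c2 := if PySem.Str.startswith line "drop" then c.2.1 + 1 else c.2.1
        let c3 := if PySem.Str.startswith line "ignore" then c.2.2.1 + 1 else c.2.2.1
        let c4 := if PySem.Str.startswith line "invchance" then c.2.2.2.1 + 1 else c.2.2.2.1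
        let c5 := if PySem.Str.startswith line "skill" then c.2.2.2.2.1 + 1 else c.2.2.2.2.1
        let c6 := if PySem.Str.startswith line "invtime" then c.2.2.2.2.2 + 1 else c.2.2.2.2.2
        (c1, c2, c3, c4, c5, c6)) c
    = (c.1 + (roll.countP (fun l => PySem.Str.startswith l "ied") : Int),
       c.2.1 + (roll.countP (fun l => PySem.Str.startswith l "drop") : Int),
       c.2.2.1 + (roll.countP (fun l => PySem.Str.startswith l "ignore") : Int),
       c.2.2.2.1 + (roll.countP (fun l => PySem.Str.startswith l "invchance") : Int),
       c.2.2.2.2.1 + (roll.countP (fun l => PySem.Str.startswith l "skill") : Int),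
       c.2.2.2.2.2 + (roll.countP (fun l => PySem.Str.startswith l "invtime") : Int)) := by
  induction roll generalizing c with
  | nil => simp
  | cons h t ih =>
      rw [List.foldl_cons, ih]
      obtain ⟨a1, a2, a3, a4, a5, a6⟩ := c
      dsimp only
      simp only [Prod.mk.injEq, List.countP_cons]
      refine ⟨?_, ?_, ?_, ?_, ?_, ?_⟩ <;>
        · split_ifs <;> push_cast <;> omega

-- ===== VERDICT (by name: the statement is the Claim_ definition above) =====
theorem is_valid_roll_spec : Claim_equal_is_valid_roll := by
  intro roll _
  unfold Spec_is_valid_roll is_valid_roll is_valid_roll_alt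
  rw [alt_fold_eq]
  simp only [pvSumStarts_eq, zero_add]
  split_ifs <;> simp_all
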